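-- pv_equiv track=rewrite | github.com/leorasc/python-vote-core | test_functionality/test_borda_manipulation_heurestics_methods.py | create_alphabet_vote
-- ===== SOURCE A (Python) =====
-- def create_alphabet_vote(m):
--     ABC = ['Z', 'A', 'B', 'C', 'D', 'E', 'F', 'G', 'H', 'I', 'J', 'K', 'L', 'M', 'N', 'O', 'P', 'Q', 'R', 'S', 'T', 'U',
--         'V', 'W', 'X', 'Y']
--     preference = []
--     for i in range(1, m + 1):
--         tmp = ''
--         c = i
--         while c >= 0:
--             tmp += ABC[c % 26]
--             c = c - 26
--             if c == 0:
--                 c = -1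
--         preference.append(tmp)
--     return preference
-- ===== SOURCE B (Python) =====
-- def create_alphabet_vote(m):
--     ABC = ['Z', 'A', 'B', 'C', 'D', 'E', 'F', 'G', 'H', 'I', 'J', 'K', 'L', 'M', 'N', 'O', 'P', 'Q', 'R', 'S', 'T', 'U',
--         'V', 'W', 'X', 'Y']
--     return [ABC[i % 26] * ((i + 25) // 26) for i in range(1, m + 1)]
-- ===== Notes on version B (the rewrite author's own statement) =====
-- stated objective: simpler
-- what changed: Replaces the inner decrement-by-alphabet-size while-loop (with its c==0 guard) by a closed form: each entry is the character ABC[i % len(ABC)] repeated ceil(i/len(ABC)) times, produced in a single list comprehension.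
import Mathlib
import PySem

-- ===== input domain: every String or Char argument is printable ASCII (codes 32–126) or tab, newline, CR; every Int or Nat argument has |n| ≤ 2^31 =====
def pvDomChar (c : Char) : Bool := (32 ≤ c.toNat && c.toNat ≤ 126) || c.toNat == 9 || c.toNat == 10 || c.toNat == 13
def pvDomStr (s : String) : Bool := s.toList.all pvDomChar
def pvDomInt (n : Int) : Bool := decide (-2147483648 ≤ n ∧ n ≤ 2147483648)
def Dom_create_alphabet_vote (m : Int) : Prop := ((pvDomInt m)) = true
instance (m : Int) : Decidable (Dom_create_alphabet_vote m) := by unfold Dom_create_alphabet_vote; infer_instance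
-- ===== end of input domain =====

-- B replaces A's inner decrement-by-26 while-loop with a closed form (char ABC[i % 26] repeated (i+25)//26 times); objective: simpler.

-- ===== PORT A =====
-- ABC, a table of 26 one-character strings in the Python; kept as the list of those characters (strings are List Char in PySem style).
def pvABC : List Char := ['Z', 'A', 'B', 'C', 'D', 'E', 'F', 'G', 'H', 'I', 'J', 'K', 'L', 'M', 'N', 'O', 'P', 'Q', 'R', 'S', 'T', 'U', 'V', 'W', 'X', 'Y']

-- the inner 'while c >= 0' loop of A; the index c % 26 is always in [0, 26), so the pyGetD default is never used
def pvLoopA (c : Int) (tmp : List Char) : List Char :=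
  if 0 ≤ c then
    pvLoopA (if c - 26 = 0 then -1 else c - 26)
            (tmp ++ [PySem.List.pyGetD pvABC (PySem.Int.mod c 26) 'Z'])
  else tmp
termination_by (c + 1).toNat
decreasing_by split <;> omega

def create_alphabet_vote (m : Int) : List String :=
  (PySem.List.pyRange 1 (m + 1) 1).foldl
    (fun preference i => preference ++ [String.ofList (pvLoopA i [])]) []

-- ===== PORT B =====
-- 'ABC[i % 26] * k' with k = (i + 25) // 26: a one-char string repeated k times (k ≤ 0 gives '', matching .toNat)
def create_alphabet_vote_alt (m : Int) : List String :=
  (PySem.List.pyRange 1 (m + 1) 1).map (fun i =>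
    String.ofList (List.replicate (PySem.Int.floordiv (i + 25) 26).toNat
                              (PySem.List.pyGetD pvABC (PySem.Int.mod i 26) 'Z')))

-- ===== PRECONDITION & SPEC =====
def Spec_create_alphabet_vote (m : Int) (out : List String) : Prop := out = create_alphabet_vote_alt m
instance (m : Int) (out : List String) : Decidable (Spec_create_alphabet_vote m out) := by unfold Spec_create_alphabet_vote; infer_instance

-- ===== CLAIM (what is proved, stated in full; the proofs are below) =====
def Claim_equal_create_alphabet_vote : Prop := ∀ (m : Int), Dom_create_alphabet_vote m → Spec_create_alphabet_vote m (create_alphabet_vote m)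

-- ===== LEMMAS AND PROOFS =====

-- the inner loop appends exactly ceil(c/26) = (c+25)//26 copies of ABC[c % 26]  (for 1 ≤ c)
theorem pvLoopA_eq (n : Nat) : ∀ (c : Int), 1 ≤ c → (c + 1).toNat ≤ n → ∀ (tmp : List Char),
    pvLoopA c tmp = tmp ++ List.replicate (PySem.Int.floordiv (c + 25) 26).toNat
                                          (PySem.List.pyGetD pvABC (PySem.Int.mod c 26) 'Z') := by
  induction n with
  | zero => intro c hc hn; omega
  | succ n ih =>
    intro c hc hn tmp
    rw [pvLoopA]
    rw [if_pos (by omega)]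
    rw [PySem.Int.floordiv_eq_ediv_of_pos (by omega)]
    by_cases h27 : 27 ≤ c
    · -- recurse: c - 26 ≥ 1
      rw [if_neg (by omega)]
      rw [ih (c - 26) (by omega) (by omega)]
      rw [PySem.Int.floordiv_eq_ediv_of_pos (by omega)]
      have hmod : PySem.Int.mod (c - 26) 26 = PySem.Int.mod c 26 := by
        rw [PySem.Int.mod_eq_emod_of_pos (by omega), PySem.Int.mod_eq_emod_of_pos (by omega)]
        omega
      have hcount : (((c - 26) + 25) / 26).toNat + 1 = ((c + 25) / 26).toNat := by omega
      rw [hmod, List.append_assoc, List.singleton_append, ← List.replicate_succ, hcount]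
    · -- last iteration: 1 ≤ c ≤ 26, next c is negative in either branch
      have hstop : pvLoopA (if c - 26 = 0 then -1 else c - 26)
          (tmp ++ [PySem.List.pyGetD pvABC (PySem.Int.mod c 26) 'Z'])
          = tmp ++ [PySem.List.pyGetD pvABC (PySem.Int.mod c 26) 'Z'] := by
        rw [pvLoopA]; rw [if_neg (by split <;> omega)]
      rw [hstop]
      have hone : (c + 25) / 26 = 1 := by omega
      rw [hone]
      rfl

-- ===== VERDICT (by name: the statement is the Claim_ definition above) =====
theorem create_alphabet_vote_spec : Claim_equal_create_alphabet_vote := by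
  intro m _
  show create_alphabet_vote m = create_alphabet_vote_alt m
  unfold create_alphabet_vote create_alphabet_vote_alt
  rw [PySem.List.foldl_append_singleton_eq_map]
  apply List.map_congr_left
  intro i hi
  have h1 : 1 ≤ i := (PySem.List.mem_pyRange_one.mp hi).1
  rw [pvLoopA_eq (i + 1).toNat i h1 (by omega) []]
  rfl
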